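-- pv_equiv track=rewrite | github.com/eneshoros/text_summarization | ingilizce_ozet.py | cumle_puan_hesaplama
-- ===== SOURCE A (Python) =====
-- def cumle_puan_hesaplama(cumleler,kelime_frekanslari):
--     cumle_puanlari={}
--     for cumle in cumleler:
--         for kelime,frekans in kelime_frekanslari.items():
--             if kelime in cumle.lower():
--                 if cumle in cumle_puanlari:
--                     cumle_puanlari[cumle]+=frekans
--                 else:
--                     cumle_puanlari[cumle]=frekans
--     return cumle_puanlari
-- ===== SOURCE B (Python) =====
-- def cumle_puan_hesaplama(cumleler, kelime_frekanslari):
--     # Pass 1: multiplicity of each distinct sentence (first-occurrence order).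
--     adet = {}
--     for cumle in cumleler:
--         adet[cumle] = adet.get(cumle, 0) + 1
--     # Pass 2: score each DISTINCT sentence once; scale by its multiplicity.
--     sonuc = {}
--     for cumle, n in adet.items():
--         dusuk = cumle.lower()
--         eslesen = [frekans for kelime, frekans in kelime_frekanslari.items() if kelime in dusuk]
--         if eslesen:
--             sonuc[cumle] = n * sum(eslesen)
--     return sonuc
-- ===== Notes on version B (the rewrite author's own statement) =====
-- stated objective: alternative
-- what changed: B replaces A's per-occurrence, per-matching-word dict updates by two staged passes: a counting pass that deduplicates the sentences into (sentence, multiplicity) pairs, then one scoring pass per DISTINCT sentence whose summed matching frequencies are multiplied by the multiplicity, so repeated sentences are scanned once instead of re-scored.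
import Mathlib
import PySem

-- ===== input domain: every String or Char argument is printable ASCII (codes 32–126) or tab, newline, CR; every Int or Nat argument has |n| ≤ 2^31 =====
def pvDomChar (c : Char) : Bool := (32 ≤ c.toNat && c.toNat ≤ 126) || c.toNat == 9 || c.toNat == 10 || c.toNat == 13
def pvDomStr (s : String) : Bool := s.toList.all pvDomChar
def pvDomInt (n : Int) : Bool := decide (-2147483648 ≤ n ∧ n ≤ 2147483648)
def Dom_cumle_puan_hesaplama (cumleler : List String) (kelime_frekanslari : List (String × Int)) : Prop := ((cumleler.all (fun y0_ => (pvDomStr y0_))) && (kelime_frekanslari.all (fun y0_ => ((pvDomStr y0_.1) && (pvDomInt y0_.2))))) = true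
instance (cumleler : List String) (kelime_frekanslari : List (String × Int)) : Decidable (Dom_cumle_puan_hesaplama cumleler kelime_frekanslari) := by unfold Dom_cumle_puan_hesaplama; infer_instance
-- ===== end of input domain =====

-- B replaces A's per-occurrence, per-word dict updates by two staged passes: a counting
-- pass deduplicating the sentences, then one scoring pass per DISTINCT sentence whose
-- summed score is scaled by the sentence's multiplicity (objective: alternative).

-- ===== PORT A =====
def cumle_puan_hesaplama (cumleler : List String) (kelime_frekanslari : List (String × Int)) : List (String × Int) :=
  (cumleler.foldl (fun d cumle =>
    kelime_frekanslari.foldl (fun d kf =>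
      if PySem.Str.isIn kf.1 (PySem.Str.lower cumle) then
        if d.contains cumle then d.insert cumle (d.getD cumle 0 + kf.2)
        else d.insert cumle kf.2
      else d) d) (PySem.Dict.empty : PySem.Dict String Int)).items

-- ===== PORT B =====
def cumle_puan_hesaplama_alt (cumleler : List String) (kelime_frekanslari : List (String × Int)) : List (String × Int) :=
  let adet := cumleler.foldl (fun d c => d.insert c (d.getD c 0 + 1))
    (PySem.Dict.empty : PySem.Dict String Int)
  (adet.items.foldl (fun s cn =>
    let dusuk := PySem.Str.lower cn.1
    let eslesen := (kelime_frekanslari.filter (fun kf => PySem.Str.isIn kf.1 dusuk)).map (·.2)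
    if eslesen.isEmpty then s else s.insert cn.1 (cn.2 * eslesen.sum))
    (PySem.Dict.empty : PySem.Dict String Int)).items

-- ===== PRECONDITION & SPEC =====
def Spec_cumle_puan_hesaplama (cumleler : List String) (kelime_frekanslari : List (String × Int)) (out : List (String × Int)) : Prop := out = cumle_puan_hesaplama_alt cumleler kelime_frekanslari
instance (cumleler : List String) (kelime_frekanslari : List (String × Int)) (out : List (String × Int)) : Decidable (Spec_cumle_puan_hesaplama cumleler kelime_frekanslari out) := by unfold Spec_cumle_puan_hesaplama; infer_instance

-- ===== CLAIM (what is proved, stated in full; the proofs are below) =====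
def Claim_equal_cumle_puan_hesaplama : Prop := ∀ (cumleler : List String) (kelime_frekanslari : List (String × Int)), Dom_cumle_puan_hesaplama cumleler kelime_frekanslari → Spec_cumle_puan_hesaplama cumleler kelime_frekanslari (cumle_puan_hesaplama cumleler kelime_frekanslari)

-- ===== LEMMAS AND PROOFS =====
-- the matching frequencies of one sentence
def pvF (kfs : List (String × Int)) (c : String) : List Int :=
  (kfs.filter (fun kf => PySem.Str.isIn kf.1 (PySem.Str.lower c))).map (·.2)

-- A's inner word loop over one sentence (match predicate p) equals one conditional dict update.
theorem inner_eq (c : String) (p : String × Int → Bool) (kfs : List (String × Int))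
    (d : PySem.Dict String Int) :
    kfs.foldl (fun d kf =>
      if p kf then
        if d.contains c then d.insert c (d.getD c 0 + kf.2)
        else d.insert c kf.2
      else d) d =
    (let eslesen := (kfs.filter p).map (·.2);
     if eslesen.isEmpty then d else d.insert c (d.getD c 0 + eslesen.sum)) := by
  induction kfs generalizing d with
  | nil => simp
  | cons kf rest ih =>
    simp only [List.foldl_cons, List.filter_cons]
    by_cases hp : p kf = true
    · have hstep : (if p kf = true then
          if d.contains c = true then d.insert c (d.getD c 0 + kf.2) else d.insert c kf.2
        else d) = d.insert c (d.getD c 0 + kf.2) := by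
        rw [if_pos hp]
        by_cases hc : d.contains c = true
        · rw [if_pos hc]
        · have h0 : d.getD c 0 = 0 :=
            PySem.Dict.getD_of_not_contains d 0 (by simpa using hc)
          rw [if_neg hc, h0, zero_add]
      rw [hstep, ih]
      by_cases hr : (rest.filter p).map (·.2) = []
      · simp [hp, hr]
      · have hne : ((rest.filter p).map (·.2)).isEmpty = false := by
          simpa [List.isEmpty_iff] using hr
        simp only [hp, if_pos, List.map_cons, List.isEmpty_cons, Bool.false_eq_true,
          if_false, List.sum_cons, hne]
        rw [PySem.Dict.getD_insert_self, PySem.Dict.insert_insert_self, add_assoc]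
    · rw [if_neg hp, ih, if_neg hp]

-- characterisation of a conditional accumulate-into-dict loop (score function F), from empty
theorem A_inv (F : String → List Int) (xs : List String) :
    (xs.foldl (fun d c =>
        if (F c).isEmpty then d else d.insert c (d.getD c 0 + (F c).sum))
      (PySem.Dict.empty : PySem.Dict String Int)).items =
    ((PySem.Set.ofList xs).filter (fun c => !(F c).isEmpty)).map
      (fun c => (c, (xs.count c : Int) * (F c).sum)) := by
  induction xs using List.reverseRecOn with
  | nil => rfl
  | append_singleton xs x ih =>
    rw [List.foldl_append, List.foldl_cons, List.foldl_nil]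
    have hset : PySem.Set.ofList (xs ++ [x]) = PySem.Set.add (PySem.Set.ofList xs) x := by
      simp [PySem.Set.ofList_append, PySem.Set.update_cons, PySem.Set.update_nil]
    have hnodup : (PySem.Set.ofList xs).Nodup := PySem.Set.nodup_ofList xs
    have hcount : ∀ c : String, c ≠ x → (xs ++ [x]).count c = xs.count c := by
      intro c hc
      have h1 : List.count c [x] = 0 := List.count_eq_zero.mpr (by simp [hc])
      simp [List.count_append, h1]
    by_cases hpx : (F x).isEmpty = true
    · rw [if_pos hpx, ih, hset]
      by_cases hx : x ∈ PySem.Set.ofList xs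
      · rw [PySem.Set.add_of_mem hx]
        apply List.map_congr_left
        intro c hc
        have hcx : c ≠ x := by
          rintro rfl
          simp [List.mem_filter, hpx] at hc
        rw [hcount c hcx]
      · rw [PySem.Set.add_of_not_mem hx, List.filter_append]
        have : List.filter (fun c => !(F c).isEmpty) [x] = [] := by
          simp [hpx]
        rw [this, List.append_nil]
        apply List.map_congr_left
        intro c hc
        have hcx : c ≠ x := by
          rintro rfl
          exact hx (List.mem_filter.mp hc).1
        rw [hcount c hcx]
    · rw [if_neg hpx]
      have hpx' : (!(F x).isEmpty) = true := by simp [hpx]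
      have hkeys : (xs.foldl (fun d c =>
          if (F c).isEmpty then d else d.insert c (d.getD c 0 + (F c).sum))
          (PySem.Dict.empty : PySem.Dict String Int)).keys =
          (PySem.Set.ofList xs).filter (fun c => !(F c).isEmpty) := by
        simp only [PySem.Dict.keys, ih, List.map_map]
        exact List.map_id _
      have hkeysnd : (xs.foldl (fun d c =>
          if (F c).isEmpty then d else d.insert c (d.getD c 0 + (F c).sum))
          (PySem.Dict.empty : PySem.Dict String Int)).keys.Nodup := by
        rw [hkeys]; exact hnodup.filter _
      by_cases hmem : x ∈ xs
      · -- overwrite in place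
        have hxset : x ∈ PySem.Set.ofList xs := (PySem.Set.mem_ofList xs x).mpr hmem
        have hxfil : x ∈ (PySem.Set.ofList xs).filter (fun c => !(F c).isEmpty) :=
          List.mem_filter.mpr ⟨hxset, hpx'⟩
        have hcontains : (xs.foldl (fun d c =>
            if (F c).isEmpty then d else d.insert c (d.getD c 0 + (F c).sum))
            (PySem.Dict.empty : PySem.Dict String Int)).contains x = true := by
          rw [PySem.Dict.contains_iff_mem_keys, hkeys]; exact hxfil
        have hitem : (x, ((xs.count x : Int)) * (F x).sum) ∈
            (xs.foldl (fun d c =>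
              if (F c).isEmpty then d else d.insert c (d.getD c 0 + (F c).sum))
              (PySem.Dict.empty : PySem.Dict String Int)).items := by
          rw [ih]; exact List.mem_map.mpr ⟨x, hxfil, rfl⟩
        have hgetD : (xs.foldl (fun d c =>
            if (F c).isEmpty then d else d.insert c (d.getD c 0 + (F c).sum))
            (PySem.Dict.empty : PySem.Dict String Int)).getD x 0 =
            ((xs.count x : Int)) * (F x).sum :=
          PySem.Dict.getD_of_mem_items _ hitem hkeysnd 0
        rw [PySem.Dict.items_insert_of_contains _ _ hcontains, hgetD, ih, hset,
          PySem.Set.add_of_mem hxset, List.map_map]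
        apply List.map_congr_left
        intro c hc
        by_cases hcx : c = x
        · subst hcx
          simp only [Function.comp, beq_self_eq_true, if_pos]
          have h2 : ((xs ++ [c]).count c : Int) = (xs.count c : Int) + 1 := by
            simp [List.count_append]
          rw [h2]; ring_nf
        · have hbeq : (c == x) = false := by simp [hcx]
          simp only [Function.comp, hbeq, Bool.false_eq_true, if_false]
          rw [hcount c hcx]
      · -- fresh key: append
        have hxset : x ∉ PySem.Set.ofList xs := fun h => hmem ((PySem.Set.mem_ofList xs x).mp h)
        have hcontains : (xs.foldl (fun d c =>
            if (F c).isEmpty then d else d.insert c (d.getD c 0 + (F c).sum))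
            (PySem.Dict.empty : PySem.Dict String Int)).contains x = false := by
          rw [Bool.eq_false_iff]
          intro h
          rw [PySem.Dict.contains_iff_mem_keys, hkeys] at h
          exact hxset (List.mem_filter.mp h).1
        have hgetD : (xs.foldl (fun d c =>
            if (F c).isEmpty then d else d.insert c (d.getD c 0 + (F c).sum))
            (PySem.Dict.empty : PySem.Dict String Int)).getD x 0 = 0 :=
          PySem.Dict.getD_of_not_contains _ _ hcontains
        rw [PySem.Dict.items_insert_of_not_contains _ _ hcontains, hgetD, ih, hset,
          PySem.Set.add_of_not_mem hxset, List.filter_append]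
        have hfx : List.filter (fun c => !(F c).isEmpty) [x] = [x] := by
          simp [hpx]
        rw [hfx, List.map_append]
        congr 1
        · apply List.map_congr_left
          intro c hc
          have hcx : c ≠ x := by
            rintro rfl
            exact hxset (List.mem_filter.mp hc).1
          rw [hcount c hcx]
        · have hcx : (xs ++ [x]).count x = xs.count x + 1 := by
            simp [List.count_append]
          have hzero : xs.count x = 0 := List.count_eq_zero.mpr hmem
          simp [hzero]

-- B's scoring pass over fresh, distinct (sentence, multiplicity) pairs appends its results
theorem B_fold (F : String → List Int) (l : List (String × Int))
    (d : PySem.Dict String Int)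
    (hd : ∀ p ∈ l, d.contains p.1 = false) (hnd : (l.map (·.1)).Nodup) :
    (l.foldl (fun s cn =>
        if (F cn.1).isEmpty then s else s.insert cn.1 (cn.2 * (F cn.1).sum)) d).items =
    d.items ++ (l.filter (fun cn => !(F cn.1).isEmpty)).map
      (fun cn => (cn.1, cn.2 * (F cn.1).sum)) := by
  induction l generalizing d with
  | nil => simp
  | cons p l ih =>
    simp only [List.foldl_cons, List.filter_cons, List.map_cons] at *
    by_cases hp : (F p.1).isEmpty = true
    · rw [if_pos hp, ih d (fun q hq => hd q (List.mem_cons_of_mem p hq)) hnd.of_cons]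
      simp [hp]
    · rw [if_neg hp]
      have hd' : ∀ q ∈ l, (d.insert p.1 (p.2 * (F p.1).sum)).contains q.1 = false := by
        intro q hq
        rw [PySem.Dict.contains_insert]
        have hmem : p.1 ∉ l.map (·.1) := by
          have := hnd; simp only [List.nodup_cons] at this; exact this.1
        have hne : (q.1 == p.1) = false := by
          simp only [beq_eq_false_iff_ne, ne_eq]
          intro h
          exact hmem (List.mem_map.mpr ⟨q, hq, h⟩)
        rw [hne, hd q (List.mem_cons_of_mem p hq)]
        rfl
      rw [ih _ hd' hnd.of_cons,
        PySem.Dict.items_insert_of_not_contains _ _ (hd p (List.mem_cons_self))]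
      simp [hp, List.append_assoc]

-- ===== VERDICT (by name: the statement is the Claim_ definition above) =====
theorem cumle_puan_hesaplama_spec : Claim_equal_cumle_puan_hesaplama := by
  intro cumleler kfs _
  show cumle_puan_hesaplama cumleler kfs = cumle_puan_hesaplama_alt cumleler kfs
  have hAside : cumle_puan_hesaplama cumleler kfs =
      ((PySem.Set.ofList cumleler).filter (fun c => !(pvF kfs c).isEmpty)).map
        (fun c => (c, (cumleler.count c : Int) * (pvF kfs c).sum)) := by
    unfold cumle_puan_hesaplama
    have hA : (fun (d : PySem.Dict String Int) (cumle : String) =>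
        kfs.foldl (fun d kf =>
          if PySem.Str.isIn kf.1 (PySem.Str.lower cumle) then
            if d.contains cumle then d.insert cumle (d.getD cumle 0 + kf.2)
            else d.insert cumle kf.2
          else d) d) =
        (fun (d : PySem.Dict String Int) (c : String) =>
          if (pvF kfs c).isEmpty then d else d.insert c (d.getD c 0 + (pvF kfs c).sum)) := by
      funext d c
      exact inner_eq c (fun kf => PySem.Str.isIn kf.1 (PySem.Str.lower c)) kfs d
    rw [hA, A_inv (pvF kfs) cumleler]
  have hBside : cumle_puan_hesaplama_alt cumleler kfs =
      ((PySem.Set.ofList cumleler).filter (fun c => !(pvF kfs c).isEmpty)).map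
        (fun c => (c, (cumleler.count c : Int) * (pvF kfs c).sum)) := by
    -- the let-bindings of the port reduce definitionally to the pvF form
    show (((cumleler.foldl (fun d c => d.insert c (d.getD c 0 + 1))
        (PySem.Dict.empty : PySem.Dict String Int)).items.foldl
        (fun s cn =>
          if (pvF kfs cn.1).isEmpty then s else s.insert cn.1 (cn.2 * (pvF kfs cn.1).sum))
        (PySem.Dict.empty : PySem.Dict String Int)).items) =
      ((PySem.Set.ofList cumleler).filter (fun c => !(pvF kfs c).isEmpty)).map
        (fun c => (c, (cumleler.count c : Int) * (pvF kfs c).sum))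
    rw [PySem.Dict.foldl_insert_getD_add_one_eq_counter, PySem.Dict.items_counter,
      B_fold (pvF kfs) _ _ (fun p _ => rfl)
        (by simp [Function.comp_def])]
    rw [List.filter_map, List.map_map]
    apply List.map_congr_left
    intro c _
    rfl
  rw [hAside, hBside]
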